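-- pv_equiv track=rewrite | github.com/marinaigual/PTM_analysis | Data_Extractor.py | check_pardig
-- ===== SOURCE A (Python) =====
-- def check_pardig(list_seqs):
--     list_noParGid = []
--     list_s = sorted(list_seqs)
--     for i in range(len(list_s)):
--         result = [x for x in list_s[i+1:] if x.startswith(list_s[i])]
--         if result == []:
--             list_noParGid.append(list_s[i])
--     return(list_noParGid)
-- ===== SOURCE B (Python) =====
-- def check_pardig(list_seqs):
--     s = sorted(list_seqs)
--     # in sorted order, some later element starts with s[i] iff the immediate successor does
--     return [a for a, b in zip(s, s[1:]) if not b.startswith(a)] + s[-1:]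
-- ===== Notes on version B (the rewrite author's own statement) =====
-- stated objective: faster
-- what changed: Instead of scanning the whole sorted tail for a prefix match at every index, B compares each sorted element only to its immediate successor (any later prefix match implies the successor matches), via one zip pass.
import Mathlib
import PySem

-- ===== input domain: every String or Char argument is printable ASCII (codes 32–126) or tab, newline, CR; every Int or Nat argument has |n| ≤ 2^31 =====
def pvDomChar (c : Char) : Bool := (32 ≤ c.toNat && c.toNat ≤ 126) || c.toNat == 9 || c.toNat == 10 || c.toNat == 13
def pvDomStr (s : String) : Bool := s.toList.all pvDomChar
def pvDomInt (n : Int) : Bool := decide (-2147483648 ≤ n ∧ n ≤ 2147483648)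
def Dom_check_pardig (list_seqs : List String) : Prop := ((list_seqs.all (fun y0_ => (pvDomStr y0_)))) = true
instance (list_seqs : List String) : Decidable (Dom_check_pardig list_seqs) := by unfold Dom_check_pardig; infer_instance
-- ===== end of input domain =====

-- B replaces A's quadratic scan of the whole sorted tail by a single zip pass that
-- compares each sorted element only to its immediate successor (faster, asymptotically).

-- ===== PORT A =====
def check_pardig (list_seqs : List String) : List String :=
  let list_noParGid : List String := []
  let list_s := PySem.List.sorted list_seqs (fun x => x) false
  (PySem.List.pyRange 0 (PySem.List.len list_s) 1).foldl
    (fun acc i =>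
      let result := (PySem.List.slice list_s (some (i + 1)) none).filter
        (fun x => PySem.Str.startswith x (PySem.List.pyGetD list_s i ""))
      if result = [] then acc ++ [PySem.List.pyGetD list_s i ""] else acc)
    list_noParGid

-- ===== PORT B =====
def check_pardig_alt (list_seqs : List String) : List String :=
  let s := PySem.List.sorted list_seqs (fun x => x) false
  ((s.zip (PySem.List.slice s (some 1) none)).filter
      (fun p => !(PySem.Str.startswith p.2 p.1))).map Prod.fst
    ++ PySem.List.slice s (some (-1)) none

-- ===== PRECONDITION & SPEC =====
def Spec_check_pardig (list_seqs : List String) (out : List String) : Prop := out = check_pardig_alt list_seqs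
instance (list_seqs : List String) (out : List String) : Decidable (Spec_check_pardig list_seqs out) := by unfold Spec_check_pardig; infer_instance

-- ===== CLAIM (what is proved, stated in full; the proofs are below) =====
def Claim_equal_check_pardig : Prop := ∀ (list_seqs : List String), Dom_check_pardig list_seqs → Spec_check_pardig list_seqs (check_pardig list_seqs)

-- ===== LEMMAS AND PROOFS =====

-- A's loop, as structural recursion: keep a iff no element of the tail starts with a.
def pvFA : List String → List String
  | [] => []
  | a :: t => (if t.filter (fun x => PySem.Str.startswith x a) = [] then [a] else []) ++ pvFA t

-- B's pass, as structural recursion: keep a iff the immediate successor does not start with a.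
def pvFB : List String → List String
  | [] => []
  | [a] => [a]
  | a :: b :: t => (if !(PySem.Str.startswith b a) then [a] else []) ++ pvFB (b :: t)

-- prefix monotonicity in lexicographic order: a ≤ b ≤ x and a prefix of x ⇒ a prefix of b
theorem pv_prefix_mono : ∀ (a b x : List Char), a ≤ b → b ≤ x → a <+: x → a <+: b := by
  intro a
  induction a with
  | nil => intro b x _ _ _; exact List.nil_prefix
  | cons c a' ih =>
    intro b x hab hbx hax
    obtain ⟨x', rfl, hax'⟩ : ∃ x', x = c :: x' ∧ a' <+: x' := by
      rcases hax with ⟨t, ht⟩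
      exact ⟨a' ++ t, by simp [← ht], ⟨t, rfl⟩⟩
    rcases lt_or_eq_of_le hab with hlt | rfl
    · rcases lt_or_eq_of_le hbx with hlt2 | rfl
      · change List.Lex (· < ·) (c :: a') b at hlt
        change List.Lex (· < ·) b (c :: x') at hlt2
        cases hlt with
        | rel h1 =>
          cases hlt2 with
          | rel h2 => exact absurd (h1.trans h2) (lt_irrefl c)
          | cons h2 => exact absurd h1 (lt_irrefl c)
        | cons h1 =>
          cases hlt2 with
          | rel h2 => exact absurd h2 (lt_irrefl c)
          | cons h2 => exact List.cons_prefix_cons.mpr ⟨rfl, ih _ _ (le_of_lt (show a' < _ from h1)) (le_of_lt (show _ < x' from h2)) hax'⟩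
      · exact hax
    · exact List.prefix_refl _

theorem pv_sw_mono (a b x : String) (hab : a ≤ b) (hbx : b ≤ x)
    (h : PySem.Str.startswith x a = true) : PySem.Str.startswith b a = true := by
  rw [PySem.Str.startswith_eq, PySem.Chars.startswith_iff] at h ⊢
  exact pv_prefix_mono _ _ _ (String.le_iff_toList_le.mp hab) (String.le_iff_toList_le.mp hbx) h

theorem pv_filter_nil_iff (a b : String) (t : List String)
    (hp : (a :: b :: t).Pairwise (· ≤ ·)) :
    ((b :: t).filter (fun x => PySem.Str.startswith x a) = []) ↔
      (PySem.Str.startswith b a = false) := by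
  rw [List.filter_eq_nil_iff]
  constructor
  · intro h
    simpa using h b (by simp)
  · intro hb x hx
    simp only [Bool.not_eq_true]
    rw [List.mem_cons] at hx
    rcases hx with rfl | hx
    · exact hb
    · by_contra hc
      rw [Bool.not_eq_false] at hc
      have hab : a ≤ b := (List.pairwise_cons.mp hp).1 b (by simp)
      have hbx : b ≤ x := (List.pairwise_cons.mp (List.pairwise_cons.mp hp).2).1 x hx
      rw [pv_sw_mono a b x hab hbx hc] at hb
      simp at hb

theorem pv_fA_eq_fB : ∀ (s : List String), s.Pairwise (· ≤ ·) → pvFA s = pvFB s := by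
  intro s
  induction s with
  | nil => intro _; rfl
  | cons a t ih =>
    intro hp
    cases t with
    | nil => simp [pvFA, pvFB]
    | cons b t' =>
      have htail := (List.pairwise_cons.mp hp).2
      have e1 : pvFA (a :: b :: t') = (if (b :: t').filter (fun x => PySem.Str.startswith x a) = [] then [a] else []) ++ pvFA (b :: t') := rfl
      have e2 : pvFB (a :: b :: t') = (if !(PySem.Str.startswith b a) then [a] else []) ++ pvFB (b :: t') := rfl
      rw [e1, e2, ih htail]
      congr 1
      rcases Bool.eq_false_or_eq_true (PySem.Str.startswith b a) with h | h
      · rw [if_neg (fun hc => by rw [(pv_filter_nil_iff a b t' hp).mp hc] at h; cases h),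
            if_neg (by rw [h]; simp)]
      · rw [if_pos ((pv_filter_nil_iff a b t' hp).mpr h), if_pos (by rw [h]; rfl)]

-- A's index body over range(len s), on the Nat side
def pvG (s : List String) (acc : List String) (k : Nat) : List String :=
  if (s.drop (k + 1)).filter (fun x => PySem.Str.startswith x (s.getD k "")) = []
  then acc ++ [s.getD k ""] else acc

theorem pv_range_foldl_fA : ∀ (s : List String) (acc : List String),
    (List.range s.length).foldl (pvG s) acc = acc ++ pvFA s := by
  intro s
  induction s with
  | nil => intro acc; simp [pvFA]
  | cons a t ih =>
    intro acc
    rw [List.length_cons, List.range_succ_eq_map, List.foldl_cons, List.foldl_map]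
    have hbody : (fun (acc : List String) (k : Nat) => pvG (a :: t) acc (k + 1)) = pvG t := by
      funext acc k
      simp [pvG]
    have h0 : pvG (a :: t) acc 0 =
        acc ++ (if t.filter (fun x => PySem.Str.startswith x a) = [] then [a] else []) := by
      simp [pvG]
      split_ifs <;> simp
    rw [hbody, ih, h0]
    simp [pvFA]

theorem pv_A_eq_fA (s : List String) :
    (PySem.List.pyRange 0 (PySem.List.len s) 1).foldl
      (fun acc i =>
        if (PySem.List.slice s (some (i + 1)) none).filter
            (fun x => PySem.Str.startswith x (PySem.List.pyGetD s i "")) = []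
        then acc ++ [PySem.List.pyGetD s i ""] else acc) [] = pvFA s := by
  rw [PySem.List.len_eq, PySem.List.pyRange_one, List.foldl_map]
  have hbody : (fun (acc : List String) (k : Nat) =>
      if (PySem.List.slice s (some ((0 : Int) + (k : Int) + 1)) none).filter
          (fun x => PySem.Str.startswith x (PySem.List.pyGetD s ((0 : Int) + (k : Int)) "")) = []
      then acc ++ [PySem.List.pyGetD s ((0 : Int) + (k : Int)) ""] else acc) = pvG s := by
    funext acc k
    have h1 : (0 : Int) + (k : Int) + 1 = ((k + 1 : Nat) : Int) := by push_cast; ring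
    have h2 : (0 : Int) + (k : Int) = ((k : Nat) : Int) := by ring
    rw [h1, h2, PySem.List.slice_from_natCast, PySem.List.pyGetD_natCast]
    rfl
  rw [show ((s.length : Int) - 0).toNat = s.length by omega, hbody, pv_range_foldl_fA]
  simp

theorem pv_B_eq_fB : ∀ (s : List String),
    ((s.zip (PySem.List.slice s (some 1) none)).filter
        (fun p => !(PySem.Str.startswith p.2 p.1))).map Prod.fst
      ++ PySem.List.slice s (some (-1)) none = pvFB s := by
  intro s
  induction s with
  | nil => rfl
  | cons a t ih =>
    cases t with
    | nil => simp [pvFB, PySem.List.slice_from_one, PySem.List.slice_from_neg_one]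
    | cons b t' =>
      rw [PySem.List.slice_from_one, PySem.List.slice_from_neg_one] at ih ⊢
      have e2 : pvFB (a :: b :: t') = (if !(PySem.Str.startswith b a) then [a] else []) ++ pvFB (b :: t') := rfl
      rw [e2, ← ih]
      simp only [List.tail_cons, List.zip_cons_cons, List.filter_cons]
      have hd : (a :: b :: t').drop ((a :: b :: t').length - 1) = (b :: t').drop ((b :: t').length - 1) := by
        simp [List.length_cons]
      rw [hd]
      by_cases h : PySem.Chars.startswith b.toList a.toList = true
      · simp [h]
      · simp [Bool.not_eq_true] at h
        simp [h]

-- ===== VERDICT (by name: the statement is the Claim_ definition above) =====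
theorem check_pardig_spec : Claim_equal_check_pardig := by
  intro xs _
  unfold Spec_check_pardig check_pardig check_pardig_alt
  rw [pv_A_eq_fA, pv_B_eq_fB]
  exact pv_fA_eq_fB _ (PySem.List.sorted_pairwise xs (fun x => x))
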